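-- pv_equiv track=rewrite | github.com/ChanHaoHao/Leetcode | 4073-lexicographically-smallest-string-after-reverse/4073-lexicographically-smallest-string-after-reverse.py | lexSmallest
-- ===== SOURCE A (Python) =====
-- def lexSmallest(s: str) -> str:
--     n = len(s)
--
--     t = s
--
--     for k in range(1,n+1):
--         # reverse the first k characters
--         new_t = s[:k][::-1] + s[k:]
--         # reverse the last k characters
--         new_p = s[:-k] + s[-k:][::-1]
--
--         # get the minimum lexicographically string
--         t = min(t, new_t, new_p)
--
--     return t
-- ===== SOURCE B (Python) =====
-- def lexSmallest(s: str) -> str: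
--     # Two independent passes that build the reversed prefix/suffix incrementally
--     # instead of slicing-and-reversing from scratch for every k.
--     best = s
--     rev = ""
--     for i, c in enumerate(s):
--         rev = c + rev                # rev == s[:i+1] reversed
--         cand = rev + s[i + 1:]
--         if cand < best:
--             best = cand
--     rev = ""
--     for i in range(len(s) - 1, -1, -1):
--         rev += s[i]                  # rev == s[i:] reversed
--         cand = s[:i] + rev
--         if cand < best:
--             best = cand
--     return best
-- ===== Notes on version B (the rewrite author's own statement) =====
-- stated objective: faster
-- what changed: Instead of slicing and reversing both ends of the string anew for every k and taking min of three strings, B makes two independent passes that grow the reversed prefix (resp. reversed suffix) incrementally by one character and keep a running minimum via a single comparison.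
import Mathlib
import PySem

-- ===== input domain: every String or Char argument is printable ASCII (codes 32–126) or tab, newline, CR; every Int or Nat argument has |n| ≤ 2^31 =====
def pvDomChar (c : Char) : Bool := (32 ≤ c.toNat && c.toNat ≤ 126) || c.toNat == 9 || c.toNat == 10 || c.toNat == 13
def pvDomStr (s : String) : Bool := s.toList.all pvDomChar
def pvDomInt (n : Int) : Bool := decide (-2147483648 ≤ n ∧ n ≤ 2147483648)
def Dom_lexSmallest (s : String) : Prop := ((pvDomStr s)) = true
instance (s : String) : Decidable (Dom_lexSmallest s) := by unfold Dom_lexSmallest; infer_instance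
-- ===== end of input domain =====

-- B replaces A's per-k slice-and-reverse of both ends with two passes that grow the
-- reversed prefix/suffix incrementally and keep a running minimum (alternative decomposition, same result).


-- ===== PORT A =====
-- string ops are ported on s.toList; s[::-1] is ported as List.reverse
-- (exact by PySem.List.slice?_none_none_neg_one); min of three strings is min ∘ min in the lex order.
def lexSmallest (s : String) : String :=
  let cs := s.toList
  let n : Int := PySem.Str.len s
  let t := (PySem.List.pyRange 1 (n + 1)).foldl (fun t k =>
      let new_t := (PySem.List.slice cs none (some k)).reverse ++ PySem.List.slice cs (some k) none
      let new_p := PySem.List.slice cs none (some (-k)) ++ (PySem.List.slice cs (some (-k)) none).reverse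
      min (min t new_t) new_p) cs
  String.ofList t

-- ===== PORT B =====
-- pass 1: fold over enumerate(s) with state (best, rev); pass 2: fold over range(n-1,-1,-1).
def lexSmallest_alt (s : String) : String :=
  let cs := s.toList
  let p := (PySem.List.enumerate cs).foldl
      (fun (st : List Char × List Char) ic =>
        let rev := ic.2 :: st.2
        let cand := rev ++ PySem.List.slice cs (some (ic.1 + 1)) none
        (if cand < st.1 then cand else st.1, rev)) (cs, [])
  let q := (PySem.List.pyRange (PySem.Str.len s - 1) (-1) (-1)).foldl
      (fun (st : List Char × List Char) i =>
        let rev := st.2 ++ [PySem.List.pyGetD cs i ' ']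
        let cand := PySem.List.slice cs none (some i) ++ rev
        (if cand < st.1 then cand else st.1, rev)) (p.1, [])
  String.ofList q.1

-- ===== PRECONDITION & SPEC =====
def Spec_lexSmallest (s : String) (out : String) : Prop := out = lexSmallest_alt s
instance (s : String) (out : String) : Decidable (Spec_lexSmallest s out) := by unfold Spec_lexSmallest; infer_instance

-- ===== CLAIM (what is proved, stated in full; the proofs are below) =====
def Claim_equal_lexSmallest : Prop := ∀ (s : String), Dom_lexSmallest s → Spec_lexSmallest s (lexSmallest s)

-- ===== LEMMAS AND PROOFS =====

-- candidate strings: prefix of length k reversed / suffix from position i reversed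
def prefC (cs : List Char) (k : Nat) : List Char := (cs.take k).reverse ++ cs.drop k
def sufC (cs : List Char) (i : Nat) : List Char := cs.take i ++ (cs.drop i).reverse

theorem pvIfMin (a b : List Char) : (if b < a then b else a) = min a b := by
  rcases lt_or_ge b a with h | h
  · simp [h, min_eq_right h.le]
  · simp [not_lt.mpr h, min_eq_left h]

theorem pvRangeShift (m : Nat) (a : Int) :
    PySem.List.pyRange a (a + m) = (List.range m).map (fun (j : Nat) => a + (j : Int)) := by
  induction m generalizing a with
  | zero => simp [PySem.List.pyRange]
  | succ m ih =>
      rw [show (a + ((m + 1 : Nat) : Int)) = (a + 1) + (m : Int) by push_cast; ring,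
        PySem.List.pyRange_one_cons (by omega), ih (a + 1), List.range_succ_eq_map]
      simp only [List.map_cons, Nat.cast_zero, add_zero, List.map_map]
      refine congrArg _ (List.map_congr_left fun j _ => ?_)
      simp [Function.comp]; ring

theorem pvFold3 {α : Type} (f g : α → List Char) (l : List α) (init : List Char) :
    l.foldl (fun t j => min (min t (f j)) (g j)) init
      = List.foldl min init (l.flatMap fun j => [f j, g j]) := by
  induction l generalizing init with
  | nil => rfl
  | cons a l ih => simp [List.flatMap_cons, ih]

theorem pvFlatMapPairPerm {α β : Type} (f g : α → β) (l : List α) :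
    (l.flatMap fun j => [f j, g j]).Perm (l.map f ++ l.map g) := by
  induction l with
  | nil => simp
  | cons a l ih =>
      simp only [List.flatMap_cons, List.map_cons, List.cons_append]
      exact ((ih.cons (g a)).cons (f a)).trans ((List.perm_middle.symm).cons (f a))

-- A's fold written as a plain running minimum over its candidate list
theorem pvAList (s : String) :
    (lexSmallest s).toList
      = List.foldl min s.toList
          ((List.range s.toList.length).flatMap fun j =>
            [prefC s.toList (j + 1), sufC s.toList (s.toList.length - (j + 1))]) := by
  unfold lexSmallest
  rw [String.toList_ofList, PySem.Str.len_eq,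
    show ((s.toList.length : Int) + 1) = 1 + (s.toList.length : Int) by ring,
    pvRangeShift s.toList.length 1, List.foldl_map]
  rw [PySem.List.foldl_congr_mem _ _
    (fun t j => min (min t (prefC s.toList (j + 1))) (sufC s.toList (s.toList.length - (j + 1)))) _ ?_]
  · exact pvFold3 _ _ _ _
  · intro acc j hj
    have h1 : (1 : Int) + (j : Int) = ((j + 1 : Nat) : Int) := by push_cast; ring
    have h2 : 0 < j + 1 := by omega
    simp only [h1, PySem.List.slice_to_natCast, PySem.List.slice_from_natCast,
      PySem.List.slice_to_neg_natCast _ _ h2, PySem.List.slice_from_neg_natCast _ _ h2,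
      prefC, sufC]

-- B pass 1 invariant: processing the enumerate-tail that starts at position pre.length
theorem pvLoop1 (rest pre best : List Char) :
    ((PySem.List.enumerate rest (pre.length : Int)).foldl
      (fun (st : List Char × List Char) ic =>
        let rev := ic.2 :: st.2
        let cand := rev ++ PySem.List.slice (pre ++ rest) (some (ic.1 + 1)) none
        (if cand < st.1 then cand else st.1, rev)) (best, pre.reverse))
    = (List.foldl min best
        ((List.range rest.length).map fun t => prefC (pre ++ rest) (pre.length + t + 1)),
       (pre ++ rest).reverse) := by
  induction rest generalizing pre best with
  | nil => simp [PySem.List.enumerate]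
  | cons c rest ih =>
      have hassoc : pre ++ c :: rest = (pre ++ [c]) ++ rest := by simp
      have hlen : (pre ++ [c]).length = pre.length + 1 := by simp
      have hslice : PySem.List.slice (pre ++ c :: rest) (some ((pre.length : Int) + 1)) none
          = rest := by
        rw [show ((pre.length : Int) + 1) = ((pre.length + 1 : Nat) : Int) by push_cast; ring,
          PySem.List.slice_from_natCast, hassoc, List.drop_left' hlen]
      have hcand : (c :: pre.reverse) ++ rest = prefC (pre ++ c :: rest) (pre.length + 1) := by
        unfold prefC
        rw [hassoc, List.take_left' hlen, List.drop_left' hlen]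
        simp
      rw [show PySem.List.enumerate (c :: rest) (pre.length : Int)
            = ((pre.length : Int), c) :: PySem.List.enumerate rest ((pre.length : Int) + 1) by
          simp [PySem.List.enumerate]]
      simp only [List.foldl_cons, hslice]
      rw [show ((pre.length : Int) + 1) = ((pre ++ [c]).length : Int) by simp,
        show (c :: pre.reverse) = (pre ++ [c]).reverse by simp]
      conv_lhs => rw [hassoc]
      rw [ih (pre ++ [c]) _, ← hassoc]
      congr 1
      simp only [List.length_cons, List.range_succ_eq_map, List.map_cons, List.map_map,
        List.foldl_cons]
      rw [show pre.length + 0 + 1 = pre.length + 1 by omega]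
      rw [show (pre ++ [c]).reverse ++ rest = (c :: pre.reverse) ++ rest by simp, hcand, pvIfMin]
      congr 1
      refine List.map_congr_left fun j _ => ?_
      simp only [Function.comp]
      congr 1
      simp [hlen]
      omega

-- B pass 2 invariant: the remaining indices i-1, …, 0, with rev the reversed suffix from i
theorem pvLoop2 (cs : List Char) (i : Nat) (hi : i ≤ cs.length) (best : List Char) :
    ((((List.range i).reverse).map (fun (j : Nat) => (j : Int))).foldl
      (fun (st : List Char × List Char) k =>
        let rev := st.2 ++ [PySem.List.pyGetD cs k ' ']
        let cand := PySem.List.slice cs none (some k) ++ rev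
        (if cand < st.1 then cand else st.1, rev)) (best, (cs.drop i).reverse))
    = (List.foldl min best (((List.range i).reverse).map fun j => sufC cs j), cs.reverse) := by
  induction i generalizing best with
  | zero => simp
  | succ i ih =>
      have hi' : i < cs.length := by omega
      rw [List.range_succ, List.reverse_append]
      simp only [List.reverse_cons, List.reverse_nil, List.nil_append, List.map_cons,
        List.foldl_cons, List.cons_append]
      rw [PySem.List.pyGetD_natCast, List.getD_eq_getElem _ _ hi',
        PySem.List.slice_to_natCast]
      have hdrop : (cs.drop (i + 1)).reverse ++ [cs[i]] = (cs.drop i).reverse := by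
        conv_rhs => rw [List.drop_eq_getElem_cons hi']
        rw [List.reverse_cons]
      rw [hdrop, show cs.take i ++ (cs.drop i).reverse = sufC cs i by rfl, pvIfMin,
        ih (by omega)]

-- B as a plain running minimum over the prefix candidates, then the suffix candidates
theorem pvBList (s : String) :
    (lexSmallest_alt s).toList
      = List.foldl min s.toList
          ((((List.range s.toList.length).map fun t => prefC s.toList (t + 1))
            ++ ((List.range s.toList.length).reverse).map fun j => sufC s.toList j)) := by
  unfold lexSmallest_alt
  rw [String.toList_ofList, PySem.Str.len_eq]
  have h1 := pvLoop1 s.toList [] s.toList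
  simp only [List.nil_append, List.length_nil, Nat.cast_zero, List.reverse_nil] at h1
  rw [h1]
  have hrange : PySem.List.pyRange ((s.toList.length : Int) - 1) (-1) (-1)
      = (((List.range s.toList.length).reverse).map (fun (j : Nat) => (j : Int))) := by
    rw [PySem.List.pyRange_neg_one_eq_reverse]
    rw [show (-1 : Int) + 1 = 0 by ring, show ((s.toList.length : Int) - 1) + 1
      = 0 + (s.toList.length : Int) by ring, pvRangeShift s.toList.length 0]
    simp [List.map_reverse]
  rw [hrange]
  have h2 := pvLoop2 s.toList s.toList.length (le_refl _)
      (List.foldl min s.toList ((List.range s.toList.length).map fun t => prefC s.toList (0 + t + 1)))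
  simp only [List.drop_length, List.reverse_nil] at h2
  rw [h2]
  dsimp only
  rw [List.foldl_append]
  congr 2
  exact List.map_congr_left fun t _ => by rw [Nat.zero_add]

-- ===== VERDICT (by name: the statement is the Claim_ definition above) =====
theorem lexSmallest_spec : Claim_equal_lexSmallest := by
  intro s _
  unfold Spec_lexSmallest
  apply String.toList_inj.mp
  rw [pvAList s, pvBList s]
  set cs := s.toList with hcs
  set n := cs.length with hn
  have hperm : ((List.range n).flatMap fun j =>
        [prefC cs (j + 1), sufC cs (n - (j + 1))]).Perm
      (((List.range n).map fun t => prefC cs (t + 1))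
        ++ ((List.range n).reverse).map fun j => sufC cs j) := by
    have hrev : ((List.range n).reverse).map (fun j => sufC cs j)
        = (List.range n).map (fun j => sufC cs (n - (j + 1))) := by
      conv_lhs => rw [List.range_eq_range', List.reverse_range', List.map_map]
      refine List.map_congr_left fun j hj => ?_
      simp only [Function.comp]
      congr 1
      omega
    rw [hrev]
    exact pvFlatMapPairPerm _ _ _
  exact hperm.foldl_eq cs
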